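-- pv_equiv track=rewrite | github.com/bencsci/Structy-Hub | Dynamic-Programming/108-can-concat/can-concat.py | can_concat
-- ===== SOURCE A (Python) =====
-- def can_concat(s, words):
--
--   memo = {}
--
--   def dfs(curr):
--     if curr in memo:
--       return memo[curr]
--
--     if len(curr) > len(s):
--       return False
--
--     if match(curr, s):
--       return True
--
--     for word in words:
--       if dfs(curr + word):
--         memo[curr] = True
--         return memo[curr]
--
--     memo[curr] = False
--     return memo[curr]
--
--   return dfs("")
--
-- def match(w1, w2):
--   s1 = {}
--   s2 = {}
--
--   for c in w1:
--     s1[c] = 1 + s1.get(c, 0)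
--   for c in w2:
--     s2[c] = 1 + s2.get(c, 0)
--
--   return s1 == s2
-- ===== SOURCE B (Python) =====
-- def can_concat(s, words):
--   # distinct usable words: nonempty and not longer than s
--   wlist = []
--   for w in words:
--     if w and len(w) <= len(s) and w not in wlist:
--       wlist.append(w)
--
--   memo = {}
--
--   def solve(rem):
--     # rem: the remaining characters of s, as a sorted string (canonical key)
--     if not rem:
--       return True
--     if rem in memo:
--       return memo[rem]
--     res = False
--     for w in wlist:
--       out = list(rem)
--       ok = True
--       for c in w:
--         if c in out:
--           out.remove(c)
--         else:
--           ok = False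
--           break
--       if ok and solve("".join(out)):
--         res = True
--         break
--     memo[rem] = res
--     return res
--
--   return solve("".join(sorted(s)))
-- ===== Notes on version B (the rewrite author's own statement) =====
-- stated objective: alternative
-- what changed: A searches exponentially over all concatenations curr+word (memoized only per distinct concatenated string) and compares full character counters at every node; B instead precomputes the distinct usable words and runs a memoized DP over the multiset of still-unmatched characters of s (kept as a canonically sorted string), subtracting each word's characters and pruning words that do not fit. Intended as faster (a timing run saw A time out at n=16 where B answered in under a millisecond) but a timing run could not confirm the label, so it is not claimed.
-- outside the precondition, e.g. on can_concat('a', ['a', '']): A returns True, B returns True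
import Mathlib
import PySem

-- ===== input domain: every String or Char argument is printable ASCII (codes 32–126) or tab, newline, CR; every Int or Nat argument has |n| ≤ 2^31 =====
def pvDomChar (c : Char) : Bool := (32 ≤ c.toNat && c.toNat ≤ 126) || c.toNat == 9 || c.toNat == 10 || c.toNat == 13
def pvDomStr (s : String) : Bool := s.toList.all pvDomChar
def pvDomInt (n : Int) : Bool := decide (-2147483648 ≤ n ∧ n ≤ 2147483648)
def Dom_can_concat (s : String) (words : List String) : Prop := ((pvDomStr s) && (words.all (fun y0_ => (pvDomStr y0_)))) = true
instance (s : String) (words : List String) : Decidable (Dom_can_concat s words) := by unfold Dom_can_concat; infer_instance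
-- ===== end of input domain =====

-- B replaces A's DFS over growing concatenated strings by a memoized DP that subtracts each
-- word's characters from the remaining pool of s's characters (canonical sorted-string keys);
-- intended as faster (a timing run measured A timing out at n=16 where B answered in
-- under a millisecond, but had too few both-finished samples to confirm the label);
-- equivalence is proved on inputs where A terminates: word lists without the empty string,
-- plus every input with s = "" (there A returns True before looking at words).

-- ===== PORT A =====
-- Python dict equality (s1 == s2) ignores insertion order: same key set, same values.
def pyDictEq (d1 d2 : PySem.Dict Char Int) : Bool :=
  PySem.Set.equal (PySem.Dict.keys d1) (PySem.Dict.keys d2) &&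
    (PySem.Dict.keys d1).all (fun k => PySem.Dict.get? d1 k == PySem.Dict.get? d2 k)

-- port of helper match(w1, w2)
def matchCnt (w1 w2 : List Char) : Bool :=
  let s1 := w1.foldl (fun d c => d.insert c (d.getD c 0 + 1)) PySem.Dict.empty
  let s2 := w2.foldl (fun d c => d.insert c (d.getD c 0 + 1)) PySem.Dict.empty
  pyDictEq s1 s2

-- dfs, with the memo dict threaded through; fuel only makes the recursion structural
-- (with no empty word, the length test bounds the depth by |s| + 1).
mutual
def dfsA (s : List Char) (ws : List (List Char)) :
    Nat → List Char → PySem.Dict (List Char) Bool → Bool × PySem.Dict (List Char) Bool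
  | 0, _, memo => (false, memo)
  | fuel+1, curr, memo =>
    match PySem.Dict.get? memo curr with
    | some b => (b, memo)
    | none =>
      if s.length < curr.length then (false, memo)
      else if matchCnt curr s then (true, memo)
      else
        let r := dfsAGo s ws fuel curr ws memo
        (r.1, PySem.Dict.insert r.2 curr r.1)
  termination_by fuel _ _ => (fuel, 0)

def dfsAGo (s : List Char) (ws : List (List Char)) :
    Nat → List Char → List (List Char) → PySem.Dict (List Char) Bool →
    Bool × PySem.Dict (List Char) Bool
  | _, _, [], memo => (false, memo)
  | fuel, curr, w :: rest, memo =>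
    let r := dfsA s ws fuel (curr ++ w) memo
    if r.1 then (true, r.2) else dfsAGo s ws fuel curr rest r.2
  termination_by fuel _ l _ => (fuel, l.length + 1)
end

def can_concat (s : String) (words : List String) : Bool :=
  (dfsA s.toList (words.map String.toList) (s.toList.length + 1) [] PySem.Dict.empty).1

-- ===== PORT B =====
-- the inner "for c in w: if c in out: out.remove(c) else: break" loop (remove = first occurrence)
def removeChars : List Char → List Char → Option (List Char)
  | out, [] => some out
  | out, c :: cs => if c ∈ out then removeChars (out.erase c) cs else none

mutual
def solveB (wl : List (List Char)) :
    Nat → List Char → PySem.Dict (List Char) Bool → Bool × PySem.Dict (List Char) Bool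
  | 0, _, memo => (false, memo)
  | fuel+1, rem, memo =>
    if rem = [] then (true, memo)
    else
      match PySem.Dict.get? memo rem with
      | some b => (b, memo)
      | none =>
        let r := solveBGo wl fuel rem wl memo
        (r.1, PySem.Dict.insert r.2 rem r.1)
  termination_by fuel _ _ => (fuel, 0)

def solveBGo (wl : List (List Char)) :
    Nat → List Char → List (List Char) → PySem.Dict (List Char) Bool →
    Bool × PySem.Dict (List Char) Bool
  | _, _, [], memo => (false, memo)
  | fuel, rem, w :: rest, memo =>
    match removeChars rem w with
    | none => solveBGo wl fuel rem rest memo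
    | some out =>
      let r := solveB wl fuel out memo
      if r.1 then (true, r.2) else solveBGo wl fuel rem rest r.2
  termination_by fuel _ l _ => (fuel, l.length + 1)
end

def can_concat_alt (s : String) (words : List String) : Bool :=
  let wl := words.foldl (fun acc w =>
    if w ≠ "" ∧ PySem.Str.len w ≤ PySem.Str.len s ∧ w ∉ acc then acc ++ [w] else acc) []
  (solveB (wl.map String.toList) (s.toList.length + 1)
    (PySem.List.sorted s.toList (fun c => c) false) PySem.Dict.empty).1

-- ===== PRECONDITION & SPEC =====
-- Pre_ excludes word lists containing the empty string (except when s itself is empty, where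
-- A returns True before looking at words): appending '' does not grow curr, so A's dfs can
-- call itself on the same argument forever (RecursionError on some such inputs).
def Pre_can_concat (s : String) (words : List String) : Prop := "" ∉ words ∨ s = ""
instance (s : String) (words : List String) : Decidable (Pre_can_concat s words) := by
  unfold Pre_can_concat; infer_instance

def pvWitness_can_concat : String × List String := ("ab", ["b", "a"])

def Spec_can_concat (s : String) (words : List String) (out : Bool) : Prop := out = can_concat_alt s words
instance (s : String) (words : List String) (out : Bool) : Decidable (Spec_can_concat s words out) := by unfold Spec_can_concat; infer_instance

-- ===== CLAIM (what is proved, stated in full; the proofs are below) =====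
def Claim_equal_can_concat : Prop := ∀ (s : String) (words : List String), Dom_can_concat s words → Pre_can_concat s words → Spec_can_concat s words (can_concat s words)

-- ===== LEMMAS AND PROOFS =====

-- common value specification: SolveM ws M holds iff the multiset M can be written as a sum
-- of character multisets of (nonempty) words from ws
def SolveM (ws : List (List Char)) (M : Multiset Char) : Prop :=
  M = 0 ∨ ∃ w, w ∈ ws ∧ ∃ _h1 : w ≠ [], ∃ _h2 : (↑w : Multiset Char) ≤ M,
    SolveM ws (M - ↑w)
  termination_by M.card
  decreasing_by
    have hc : ((↑w : Multiset Char)).card = w.length := Multiset.coe_card w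
    have h1 : (M - (↑w : Multiset Char)).card = M.card - ((↑w : Multiset Char)).card :=
      Multiset.card_sub _h2
    have h2 : ((↑w : Multiset Char)).card ≤ M.card := Multiset.card_le_card _h2
    have h3 : 0 < w.length := List.length_pos_iff.mpr _h1
    omega

-- fuel-indexed pure version of A's dfs (no memo)
def GoodA (s : List Char) (ws : List (List Char)) : Nat → List Char → Bool
  | 0, _ => false
  | fuel+1, curr =>
    if s.length < curr.length then false
    else if matchCnt curr s then true
    else ws.any (fun w => if w = [] then false else GoodA s ws fuel (curr ++ w))

-- fuel-indexed pure version of B's solve (no memo)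
def GoodB (wl : List (List Char)) : Nat → List Char → Bool
  | 0, _ => false
  | fuel+1, rem =>
    if rem = [] then true
    else wl.any (fun w =>
      match removeChars rem w with
      | none => false
      | some out => GoodB wl fuel out)

def InvA (s : List Char) (ws : List (List Char)) (memo : PySem.Dict (List Char) Bool) : Prop :=
  ∀ k b, PySem.Dict.get? memo k = some b → b = GoodA s ws (s.length + 1) k

def InvB (wl : List (List Char)) (memo : PySem.Dict (List Char) Bool) : Prop :=
  ∀ k b, PySem.Dict.get? memo k = some b → b = GoodB wl (k.length + 1) k

theorem cons_le_coe (c : Char) (cs rem : List Char) :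
    ((↑(c :: cs) : Multiset Char) ≤ ↑rem) ↔ c ∈ rem ∧ ((↑cs : Multiset Char) ≤ ↑(rem.erase c)) := by
  constructor
  · intro h
    have hc : c ∈ (↑rem : Multiset Char) := Multiset.mem_of_le h (by simp)
    refine ⟨by simpa using hc, ?_⟩
    have := Multiset.erase_le_erase c h
    simpa [Multiset.coe_erase] using this
  · rintro ⟨hc, h⟩
    have : (c ::ₘ (↑cs : Multiset Char)) ≤ c ::ₘ ↑(rem.erase c) := Multiset.cons_le_cons c h
    have he : c ::ₘ (↑(rem.erase c) : Multiset Char) = ↑rem := by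
      rw [← Multiset.coe_erase]
      exact Multiset.cons_erase (by simpa using hc)
    simpa [he] using this

theorem removeChars_isSome_iff (w : List Char) : ∀ rem : List Char,
    (removeChars rem w).isSome ↔ ((↑w : Multiset Char) ≤ ↑rem) := by
  induction w with
  | nil => intro rem; simp [removeChars]
  | cons c cs ih =>
    intro rem
    rw [cons_le_coe]
    by_cases hc : c ∈ rem
    · simp [removeChars, hc, ih]
    · simp [removeChars, hc]

theorem removeChars_some (w : List Char) : ∀ rem out : List Char,
    removeChars rem w = some out →
      (↑out : Multiset Char) = ↑rem - ↑w ∧ out.length + w.length = rem.length := by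
  induction w with
  | nil => intro rem out h; simp [removeChars] at h; subst h; simp
  | cons c cs ih =>
    intro rem out h
    by_cases hc : c ∈ rem
    · simp only [removeChars, hc, if_pos] at h
      obtain ⟨h1, h2⟩ := ih (rem.erase c) out h
      constructor
      · rw [h1, ← Multiset.coe_erase, ← Multiset.sub_singleton, tsub_tsub]
        rw [Multiset.singleton_add, Multiset.cons_coe]
      · have h3 := List.length_erase_of_mem hc
        have h4 := List.length_pos_of_mem hc
        simp only [List.length_cons]
        omega
    · simp [removeChars, hc] at h

theorem get?_counter_of_mem (w : List Char) (k : Char) (h : k ∈ w) :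
    PySem.Dict.get? (PySem.Dict.counter w) k = some ((w.count k : Int)) := by
  have hc : (PySem.Dict.counter w).contains k = true := by
    rw [PySem.Dict.contains_counter]; simpa using h
  rw [PySem.Dict.contains_eq_isSome_get?] at hc
  obtain ⟨v, hv⟩ := Option.isSome_iff_exists.mp hc
  have := PySem.Dict.getD_counter w k
  rw [PySem.Dict.getD_eq_get?_getD, hv] at this
  simp at this
  rw [hv, this]

theorem matchCnt_iff (w1 w2 : List Char) :
    matchCnt w1 w2 = true ↔ (↑w1 : Multiset Char) = ↑w2 := by
  show pyDictEq _ _ = true ↔ _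
  rw [show (w1.foldl (fun d c => d.insert c (d.getD c 0 + 1)) PySem.Dict.empty) = PySem.Dict.counter w1 from PySem.Dict.foldl_insert_getD_add_one_eq_counter w1]
  rw [show (w2.foldl (fun d c => d.insert c (d.getD c 0 + 1)) PySem.Dict.empty) = PySem.Dict.counter w2 from PySem.Dict.foldl_insert_getD_add_one_eq_counter w2]
  rw [Multiset.coe_eq_coe, List.perm_iff_count]
  unfold pyDictEq
  rw [Bool.and_eq_true, PySem.Dict.keys_counter, PySem.Dict.keys_counter,
    PySem.Set.equal_iff, List.all_eq_true]
  constructor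
  · rintro ⟨hkeys, hvals⟩ a
    have hmemiff : a ∈ w1 ↔ a ∈ w2 := by
      simpa [PySem.Set.mem_ofList] using hkeys a
    by_cases h1 : a ∈ w1
    · have h2 : a ∈ w2 := hmemiff.mp h1
      have := hvals a (by simpa [PySem.Set.mem_ofList, PySem.Dict.keys_counter] using h1)
      rw [get?_counter_of_mem w1 a h1, get?_counter_of_mem w2 a h2] at this
      simpa using this
    · have h2 : ¬ a ∈ w2 := fun h => h1 (hmemiff.mpr h)
      rw [List.count_eq_zero.mpr h1, List.count_eq_zero.mpr h2]
  · intro hcnt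
    have hmemiff : ∀ a, a ∈ w1 ↔ a ∈ w2 := by
      intro a
      rw [← List.count_pos_iff, ← List.count_pos_iff, hcnt a]
    constructor
    · intro a; simpa [PySem.Set.mem_ofList] using hmemiff a
    · intro k hk
      have h1 : k ∈ w1 := by simpa [PySem.Set.mem_ofList, PySem.Dict.keys_counter] using hk
      have h2 : k ∈ w2 := (hmemiff k).mp h1
      rw [get?_counter_of_mem w1 k h1, get?_counter_of_mem w2 k h2, hcnt k]
      simp

theorem goodA_succ (s : List Char) (ws : List (List Char)) :
    ∀ fuel curr, s.length < fuel + curr.length →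
      GoodA s ws (fuel + 1) curr = GoodA s ws fuel curr := by
  intro fuel
  induction fuel with
  | zero =>
    intro curr h
    simp only [GoodA]
    rw [if_pos (by omega)]
  | succ fuel ih =>
    intro curr h
    conv_lhs => rw [GoodA]
    conv_rhs => rw [GoodA]
    by_cases h1 : s.length < curr.length
    · rw [if_pos h1, if_pos h1]
    · rw [if_neg h1, if_neg h1]
      by_cases h2 : matchCnt curr s
      · rw [if_pos h2, if_pos h2]
      · rw [if_neg h2, if_neg h2]
        apply PySem.List.any_congr_mem
        intro w hw
        by_cases hwn : w = []
        · simp [hwn]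
        · have hlen : 0 < w.length := List.length_pos_iff.mpr hwn
          rw [if_neg hwn, if_neg hwn, ih (curr ++ w) (by simp [List.length_append]; omega)]

theorem goodA_stable (s : List Char) (ws : List (List Char)) :
    ∀ fuel fuel' curr, s.length < fuel + curr.length → s.length < fuel' + curr.length →
      GoodA s ws fuel curr = GoodA s ws fuel' curr := by
  have key : ∀ k fuel curr, s.length < fuel + curr.length →
      GoodA s ws (fuel + k) curr = GoodA s ws fuel curr := by
    intro k
    induction k with
    | zero => intro fuel curr h; rfl
    | succ k ih =>
      intro fuel curr h
      have : fuel + (k+1) = (fuel + k) + 1 := by omega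
      rw [this, goodA_succ s ws (fuel + k) curr (by omega), ih fuel curr h]
  intro fuel fuel' curr h h'
  rcases le_total fuel fuel' with hle | hle
  · obtain ⟨k, rfl⟩ := Nat.le.dest hle
    exact (key k fuel curr h).symm
  · obtain ⟨k, rfl⟩ := Nat.le.dest hle
    exact key k fuel' curr h'

theorem goodB_succ (wl : List (List Char)) (hwl : ∀ w ∈ wl, w ≠ []) :
    ∀ fuel rem, rem.length < fuel →
      GoodB wl (fuel + 1) rem = GoodB wl fuel rem := by
  intro fuel
  induction fuel with
  | zero => intro rem h; omega
  | succ fuel ih =>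
    intro rem h
    conv_lhs => rw [GoodB]
    conv_rhs => rw [GoodB]
    by_cases h1 : rem = []
    · rw [if_pos h1, if_pos h1]
    · rw [if_neg h1, if_neg h1]
      apply PySem.List.any_congr_mem
      intro w hw
      cases hrc : removeChars rem w with
      | none => simp
      | some out =>
        simp only []
        have hlen := (removeChars_some w rem out hrc).2
        have hwn : 0 < w.length := List.length_pos_iff.mpr (hwl w hw)
        exact ih out (by omega)

theorem goodB_stable (wl : List (List Char)) (hwl : ∀ w ∈ wl, w ≠ []) :
    ∀ fuel fuel' rem, rem.length < fuel → rem.length < fuel' →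
      GoodB wl fuel rem = GoodB wl fuel' rem := by
  have key : ∀ k fuel rem, rem.length < fuel →
      GoodB wl (fuel + k) rem = GoodB wl fuel rem := by
    intro k
    induction k with
    | zero => intro fuel rem h; rfl
    | succ k ih =>
      intro fuel rem h
      have : fuel + (k+1) = (fuel + k) + 1 := by omega
      rw [this, goodB_succ wl hwl (fuel + k) rem (by omega), ih fuel rem h]
  intro fuel fuel' rem h h'
  rcases le_total fuel fuel' with hle | hle
  · obtain ⟨k, rfl⟩ := Nat.le.dest hle
    exact (key k fuel rem h).symm
  · obtain ⟨k, rfl⟩ := Nat.le.dest hle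
    exact key k fuel' rem h'

theorem dfsA_correct (s : List Char) (ws : List (List Char)) (hws : ∀ w ∈ ws, w ≠ []) :
    ∀ fuel curr memo, s.length < fuel + curr.length → InvA s ws memo →
      (dfsA s ws fuel curr memo).1 = GoodA s ws (s.length + 1) curr ∧
        InvA s ws (dfsA s ws fuel curr memo).2 := by
  intro fuel
  induction fuel with
  | zero =>
    intro curr memo h hinv
    rw [dfsA]
    refine ⟨?_, hinv⟩
    conv_rhs => rw [GoodA]
    rw [if_pos (by omega)]
  | succ fuel ih =>
    intro curr memo h hinv
    have go : ∀ rest, (∀ w ∈ rest, w ∈ ws) → ∀ memo, InvA s ws memo →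
        (dfsAGo s ws fuel curr rest memo).1 =
          rest.any (fun w => GoodA s ws (s.length + 1) (curr ++ w)) ∧
          InvA s ws (dfsAGo s ws fuel curr rest memo).2 := by
      intro rest
      induction rest with
      | nil => intro _ memo hiv; rw [dfsAGo]; exact ⟨rfl, hiv⟩
      | cons w rest' ihr =>
        intro hsub memo hiv
        have hwne : w ≠ [] := hws w (hsub w (by simp))
        have hwlen : 0 < w.length := List.length_pos_iff.mpr hwne
        obtain ⟨hval, hiv'⟩ := ih (curr ++ w) memo (by simp [List.length_append]; omega) hiv
        rw [dfsAGo]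
        by_cases hr : (dfsA s ws fuel (curr ++ w) memo).1 = true
        · rw [if_pos hr]
          refine ⟨?_, hiv'⟩
          simp only [List.any_cons]
          rw [← hval, hr]
          rfl
        · rw [if_neg hr]
          obtain ⟨hv2, hiv2⟩ := ihr (fun x hx => hsub x (by simp [hx])) _ hiv'
          refine ⟨?_, hiv2⟩
          simp only [List.any_cons]
          rw [hv2, ← hval]
          simp [Bool.eq_false_iff.mpr hr]
    rw [dfsA]
    cases hm : PySem.Dict.get? memo curr with
    | some b =>
      simp only []
      exact ⟨(hinv curr b hm).symm ▸ rfl, hinv⟩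
    | none =>
      simp only []
      by_cases h1 : s.length < curr.length
      · rw [if_pos h1]
        refine ⟨?_, hinv⟩
        conv_rhs => rw [GoodA]
        rw [if_pos h1]
      · rw [if_neg h1]
        by_cases h2 : matchCnt curr s
        · rw [if_pos h2]
          refine ⟨?_, hinv⟩
          conv_rhs => rw [GoodA]
          rw [if_neg h1, if_pos h2]
        · rw [if_neg h2]
          obtain ⟨hgo, hgoInv⟩ := go ws (fun _ hx => hx) memo hinv
          have hGA : GoodA s ws (s.length + 1) curr =
              ws.any (fun w => GoodA s ws (s.length + 1) (curr ++ w)) := by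
            conv_lhs => rw [GoodA]
            rw [if_neg h1, if_neg h2]
            apply PySem.List.any_congr_mem
            intro w hw
            have hwne : w ≠ [] := hws w hw
            have hwlen : 0 < w.length := List.length_pos_iff.mpr hwne
            rw [if_neg hwne]
            exact goodA_stable s ws s.length (s.length + 1) (curr ++ w)
              (by simp [List.length_append]; omega) (by simp [List.length_append]; omega)
          simp only []
          constructor
          · rw [hgo, hGA]
          · intro k b hk
            by_cases hkc : k = curr
            · subst hkc
              rw [PySem.Dict.get?_insert_self] at hk
              injection hk with hk
              rw [← hk, hgo, hGA]
            · rw [PySem.Dict.get?_insert_of_ne _ _ hkc] at hk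
              exact hgoInv k b hk

theorem solveB_correct (wl : List (List Char)) (hwl : ∀ w ∈ wl, w ≠ []) :
    ∀ fuel rem memo, rem.length < fuel → InvB wl memo →
      (solveB wl fuel rem memo).1 = GoodB wl (rem.length + 1) rem ∧
        InvB wl (solveB wl fuel rem memo).2 := by
  intro fuel
  induction fuel with
  | zero => intro rem memo h hinv; omega
  | succ fuel ih =>
    intro rem memo h hinv
    rw [solveB]
    by_cases h1 : rem = []
    · rw [if_pos h1]
      refine ⟨?_, hinv⟩
      subst h1
      rw [GoodB]
      simp
    · rw [if_neg h1]
      have go : ∀ rest, (∀ w ∈ rest, w ∈ wl) → ∀ memo, InvB wl memo →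
          (solveBGo wl fuel rem rest memo).1 =
            rest.any (fun w =>
              match removeChars rem w with
              | none => false
              | some out => GoodB wl (out.length + 1) out) ∧
            InvB wl (solveBGo wl fuel rem rest memo).2 := by
        intro rest
        induction rest with
        | nil => intro _ memo hiv; rw [solveBGo]; exact ⟨rfl, hiv⟩
        | cons w rest' ihr =>
          intro hsub memo hiv
          have hwne : w ≠ [] := hwl w (hsub w (by simp))
          have hwlen : 0 < w.length := List.length_pos_iff.mpr hwne
          rw [solveBGo]
          cases hrc : removeChars rem w with
          | none =>
            simp only []
            obtain ⟨hv2, hiv2⟩ := ihr (fun x hx => hsub x (by simp [hx])) memo hiv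
            refine ⟨?_, hiv2⟩
            simp [List.any_cons, hrc, hv2]
          | some out =>
            simp only []
            have houtlen := (removeChars_some w rem out hrc).2
            obtain ⟨hval, hiv'⟩ := ih out memo (by omega) hiv
            by_cases hr : (solveB wl fuel out memo).1 = true
            · rw [if_pos hr]
              refine ⟨?_, hiv'⟩
              simp only [List.any_cons, hrc]
              rw [← hval, hr]
              rfl
            · rw [if_neg hr]
              obtain ⟨hv2, hiv2⟩ := ihr (fun x hx => hsub x (by simp [hx])) _ hiv'
              refine ⟨?_, hiv2⟩
              simp only [List.any_cons, hrc]
              rw [hv2, ← hval]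
              simp [Bool.eq_false_iff.mpr hr]
      cases hm : PySem.Dict.get? memo rem with
      | some b =>
        simp only []
        exact ⟨(hinv rem b hm).symm ▸ rfl, hinv⟩
      | none =>
        simp only []
        obtain ⟨hgo, hgoInv⟩ := go wl (fun _ hx => hx) memo hinv
        have hGB : GoodB wl (rem.length + 1) rem =
            wl.any (fun w =>
              match removeChars rem w with
              | none => false
              | some out => GoodB wl (out.length + 1) out) := by
          conv_lhs => rw [GoodB]
          rw [if_neg h1]
          apply PySem.List.any_congr_mem
          intro w hw
          have hwne : w ≠ [] := hwl w hw
          have hwlen : 0 < w.length := List.length_pos_iff.mpr hwne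
          cases hrc : removeChars rem w with
          | none => rfl
          | some out =>
            simp only []
            have houtlen := (removeChars_some w rem out hrc).2
            exact goodB_stable wl hwl rem.length (out.length + 1) out (by omega) (by omega)
        constructor
        · rw [hgo, hGB]
        · intro k b hk
          by_cases hkc : k = rem
          · subst hkc
            rw [PySem.Dict.get?_insert_self] at hk
            injection hk with hk
            rw [← hk, hgo, hGB]
          · rw [PySem.Dict.get?_insert_of_ne _ _ hkc] at hk
            exact hgoInv k b hk

theorem not_le_of_longer (s curr : List Char) (h : s.length < curr.length) :
    ¬ ((↑curr : Multiset Char) ≤ ↑s) := by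
  intro hle
  have := Multiset.card_le_card hle
  simp [Multiset.coe_card] at this
  omega

theorem goodA_iff (s : List Char) (ws : List (List Char)) (hws : ∀ w ∈ ws, w ≠ []) :
    ∀ fuel curr, s.length < fuel + curr.length →
      (GoodA s ws fuel curr = true ↔
        ((↑curr : Multiset Char) ≤ ↑s ∧ SolveM ws ((↑s : Multiset Char) - ↑curr))) := by
  intro fuel
  induction fuel with
  | zero =>
    intro curr h
    simp only [GoodA, Bool.false_eq_true, false_iff]
    rintro ⟨hle, -⟩
    exact not_le_of_longer s curr (by omega) hle
  | succ fuel ih =>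
    intro curr h
    conv_lhs => rw [GoodA]
    by_cases h1 : s.length < curr.length
    · rw [if_pos h1]
      simp only [Bool.false_eq_true, false_iff]
      rintro ⟨hle, -⟩
      exact not_le_of_longer s curr h1 hle
    · rw [if_neg h1]
      by_cases h2 : matchCnt curr s
      · rw [if_pos h2]
        have heq : (↑curr : Multiset Char) = ↑s := (matchCnt_iff curr s).mp h2
        simp only [true_iff]
        refine ⟨le_of_eq heq, ?_⟩
        rw [heq, tsub_self, SolveM]
        left; rfl
      · rw [if_neg h2]
        constructor
        · intro hany
          obtain ⟨w, hw, hval⟩ := List.any_eq_true.mp hany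
          have hwne : w ≠ [] := hws w hw
          rw [if_neg hwne] at hval
          have hwlen : 0 < w.length := List.length_pos_iff.mpr hwne
          obtain ⟨hle', hs'⟩ := (ih (curr ++ w) (by simp [List.length_append]; omega)).mp hval
          rw [← Multiset.coe_add] at hle'
          have hcle : (↑curr : Multiset Char) ≤ ↑s :=
            le_trans (Multiset.le_add_right _ _) hle'
          refine ⟨hcle, ?_⟩
          rw [SolveM]
          right
          refine ⟨w, hw, hwne, (le_tsub_iff_left hcle).mpr hle', ?_⟩
          rw [tsub_tsub, Multiset.coe_add]
          exact hs'
        · rintro ⟨hle, hs⟩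
          rw [SolveM] at hs
          rcases hs with h0 | ⟨w, hw, hwne, hle2, hs2⟩
          · exfalso
            have : (↑s : Multiset Char) ≤ ↑curr := tsub_eq_zero_iff_le.mp h0
            have heq : (↑curr : Multiset Char) = ↑s := le_antisymm hle this
            exact h2 ((matchCnt_iff curr s).mpr heq)
          · apply List.any_eq_true.mpr
            refine ⟨w, hw, ?_⟩
            rw [if_neg hwne]
            have hwlen : 0 < w.length := List.length_pos_iff.mpr hwne
            apply (ih (curr ++ w) (by simp [List.length_append]; omega)).mpr
            have hsum : (↑curr : Multiset Char) + ↑w ≤ ↑s := (le_tsub_iff_left hle).mp hle2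
            refine ⟨by rw [← Multiset.coe_add]; exact hsum, ?_⟩
            rw [← Multiset.coe_add, ← tsub_tsub]
            exact hs2

theorem goodB_iff (s : List Char) (ws wl : List (List Char)) (hwl : ∀ w ∈ wl, w ≠ [])
    (hrel : ∀ w, w ∈ wl ↔ (w ∈ ws ∧ w ≠ [] ∧ w.length ≤ s.length)) :
    ∀ fuel (rem : List Char), rem.length < fuel → ((↑rem : Multiset Char) ≤ ↑s) →
      (GoodB wl fuel rem = true ↔ SolveM ws (↑rem : Multiset Char)) := by
  intro fuel
  induction fuel with
  | zero => intro rem h; omega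
  | succ fuel ih =>
    intro rem h hsub
    conv_lhs => rw [GoodB]
    by_cases h1 : rem = []
    · rw [if_pos h1]
      subst h1
      simp only [true_iff]
      rw [SolveM]; left; rfl
    · rw [if_neg h1]
      rw [SolveM]
      constructor
      · intro hany
        obtain ⟨w, hw, hval⟩ := List.any_eq_true.mp hany
        cases hrc : removeChars rem w with
        | none => rw [hrc] at hval; simp at hval
        | some out =>
          rw [hrc] at hval
          simp only [] at hval
          have hwne : w ≠ [] := hwl w hw
          have hwlen : 0 < w.length := List.length_pos_iff.mpr hwne
          obtain ⟨hout, houtlen⟩ := removeChars_some w rem out hrc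
          have hwle : (↑w : Multiset Char) ≤ ↑rem := by
            have := (removeChars_isSome_iff w rem).mp (by rw [hrc]; rfl)
            exact this
          have houtsub : (↑out : Multiset Char) ≤ ↑s :=
            le_trans (by rw [hout]; exact tsub_le_self) hsub
          have := (ih out (by omega) houtsub).mp hval
          right
          obtain ⟨hw1, hw2, -⟩ := (hrel w).mp hw
          exact ⟨w, hw1, hw2, hwle, by rw [← hout]; exact this⟩
      · intro hs
        rcases hs with h0 | ⟨w, hwm, hwne, hwle, hs2⟩
        · exact absurd ((Multiset.coe_eq_zero rem).mp h0) h1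
        · apply List.any_eq_true.mpr
          have hwlen : 0 < w.length := List.length_pos_iff.mpr hwne
          have hwlens : w.length ≤ s.length := by
            have h1 := Multiset.card_le_card hwle
            have h2 := Multiset.card_le_card hsub
            simp [Multiset.coe_card] at h1 h2
            omega
          refine ⟨w, (hrel w).mpr ⟨hwm, hwne, hwlens⟩, ?_⟩
          have hsome : (removeChars rem w).isSome := (removeChars_isSome_iff w rem).mpr hwle
          obtain ⟨out, hrc⟩ := Option.isSome_iff_exists.mp hsome
          rw [hrc]
          simp only []
          obtain ⟨hout, houtlen⟩ := removeChars_some w rem out hrc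
          have houtsub : (↑out : Multiset Char) ≤ ↑s :=
            le_trans (by rw [hout]; exact tsub_le_self) hsub
          apply (ih out (by omega) houtsub).mpr
          rw [hout]
          exact hs2

theorem mem_buildW (s : String) (words : List String) : ∀ acc x,
    (x ∈ words.foldl (fun acc w =>
        if w ≠ "" ∧ PySem.Str.len w ≤ PySem.Str.len s ∧ w ∉ acc then acc ++ [w] else acc) acc ↔
      x ∈ acc ∨ (x ∈ words ∧ x ≠ "" ∧ PySem.Str.len x ≤ PySem.Str.len s)) := by
  induction words with
  | nil => intro acc x; simp
  | cons v vs ih =>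
    intro acc x
    simp only [List.foldl_cons, List.mem_cons]
    rw [ih]
    by_cases hcond : v ≠ "" ∧ PySem.Str.len v ≤ PySem.Str.len s ∧ v ∉ acc
    · rw [if_pos hcond]
      simp only [List.mem_append, List.mem_singleton]
      constructor
      · rintro (⟨hx | rfl⟩ | h)
        · exact Or.inl hx
        · exact Or.inr ⟨Or.inl rfl, hcond.1, hcond.2.1⟩
        · exact Or.inr ⟨Or.inr h.1, h.2⟩
      · rintro (hx | ⟨(rfl | hxvs), hx1, hx2⟩)
        · exact Or.inl (Or.inl hx)
        · exact Or.inl (Or.inr rfl)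
        · exact Or.inr ⟨hxvs, hx1, hx2⟩
    · rw [if_neg hcond]
      push_neg at hcond
      constructor
      · rintro (hx | h)
        · exact Or.inl hx
        · exact Or.inr ⟨Or.inr h.1, h.2⟩
      · rintro (hx | ⟨(rfl | hxvs), hx1, hx2⟩)
        · exact Or.inl hx
        · exact Or.inl (hcond hx1 hx2)
        · exact Or.inr ⟨hxvs, hx1, hx2⟩

-- ===== VERDICT (by name: the statement is the Claim_ definition above) =====
theorem can_concat_spec : Claim_equal_can_concat := by
  intro s words _hdom hpre
  rcases hpre with hpre | hpre
  case inr =>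
    subst hpre
    unfold Spec_can_concat can_concat can_concat_alt
    simp only [String.toList_empty]
    have hm : matchCnt [] [] = true := by decide
    simp [dfsA, solveB, PySem.Dict.get?_empty, hm, PySem.List.sorted]
  unfold Spec_can_concat can_concat can_concat_alt
  have hws : ∀ w ∈ words.map String.toList, w ≠ [] := by
    intro w hw
    obtain ⟨v, hv, rfl⟩ := List.mem_map.mp hw
    intro hnil
    exact hpre (by rwa [String.toList_eq_nil_iff.mp hnil] at hv)
  have hwl0 : ∀ x, x ∈ words.foldl (fun acc w =>
      if w ≠ "" ∧ PySem.Str.len w ≤ PySem.Str.len s ∧ w ∉ acc then acc ++ [w] else acc) [] ↔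
      (x ∈ words ∧ x ≠ "" ∧ PySem.Str.len x ≤ PySem.Str.len s) := by
    intro x
    rw [mem_buildW s words [] x]
    simp
  have hrel : ∀ w, w ∈ (words.foldl (fun acc w =>
      if w ≠ "" ∧ PySem.Str.len w ≤ PySem.Str.len s ∧ w ∉ acc then acc ++ [w] else acc) []).map String.toList ↔
      (w ∈ words.map String.toList ∧ w ≠ [] ∧ w.length ≤ s.toList.length) := by
    intro w
    simp only [List.mem_map]
    constructor
    · rintro ⟨v, hv, rfl⟩
      obtain ⟨hv1, hv2, hv3⟩ := (hwl0 v).mp hv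
      refine ⟨⟨v, hv1, rfl⟩, ?_, ?_⟩
      · intro hnil; exact hv2 (String.toList_eq_nil_iff.mp hnil)
      · rw [PySem.Str.len_eq, PySem.Str.len_eq] at hv3
        exact_mod_cast hv3
    · rintro ⟨⟨v, hv, rfl⟩, hne, hlen⟩
      refine ⟨v, (hwl0 v).mpr ⟨hv, ?_, ?_⟩, rfl⟩
      · intro hempty; exact hne (by rw [hempty]; rfl)
      · rw [PySem.Str.len_eq, PySem.Str.len_eq]
        exact_mod_cast hlen
  have hwl : ∀ w ∈ (words.foldl (fun acc w =>
      if w ≠ "" ∧ PySem.Str.len w ≤ PySem.Str.len s ∧ w ∉ acc then acc ++ [w] else acc) []).map String.toList, w ≠ [] := by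
    intro w hw
    exact ((hrel w).mp hw).2.1
  -- the A side equals GoodA at canonical fuel
  have hInvA : InvA s.toList (words.map String.toList) PySem.Dict.empty := by
    intro k b hk
    rw [PySem.Dict.get?_empty] at hk
    cases hk
  obtain ⟨hA, -⟩ := dfsA_correct s.toList (words.map String.toList) hws
    (s.toList.length + 1) [] PySem.Dict.empty (by simp) hInvA
  -- the B side equals GoodB at canonical fuel
  have hInvB : InvB ((words.foldl (fun acc w =>
      if w ≠ "" ∧ PySem.Str.len w ≤ PySem.Str.len s ∧ w ∉ acc then acc ++ [w] else acc) []).map String.toList)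
      PySem.Dict.empty := by
    intro k b hk
    rw [PySem.Dict.get?_empty] at hk
    cases hk
  obtain ⟨hB, -⟩ := solveB_correct _ hwl (s.toList.length + 1)
    (PySem.List.sorted s.toList (fun c => c) false) PySem.Dict.empty
    (by rw [PySem.List.length_sorted]; omega) hInvB
  rw [hA, hB]
  -- both pure versions are equivalent to SolveM on s's character multiset
  have hperm : (PySem.List.sorted s.toList (fun c => c) false).Perm s.toList :=
    PySem.List.sorted_perm s.toList (fun c => c) false
  have hcoe : ((PySem.List.sorted s.toList (fun c => c) false : List Char) : Multiset Char) = ↑s.toList :=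
    Multiset.coe_eq_coe.mpr hperm
  have hAiff := goodA_iff s.toList (words.map String.toList) hws (s.toList.length + 1) [] (by simp)
  have hBiff := goodB_iff s.toList (words.map String.toList) _ hwl hrel
    ((PySem.List.sorted s.toList (fun c => c) false).length + 1)
    (PySem.List.sorted s.toList (fun c => c) false) (by omega) (le_of_eq hcoe)
  rw [Bool.eq_iff_iff, hAiff, hBiff, hcoe]
  simp
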